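-- pv_equiv track=rewrite | github.com/hhzet11/algorithm_codingTest_study | PGS/level_2/귤 고르기.py | solution
-- ===== SOURCE A (Python) =====
-- def solution(k, tangerine):
--     answer = 0
--     count = {}
--     for i in tangerine:
--         if i not in count:
--             # 시간 초과
--             #count[i] = tangerine.count(i)
--             count[i] = 1
--         else :
--             count[i] += 1
--     count = sorted(count.values(), reverse=True)
--     '''
--     for i in count:
--         if k < i:
--             continue
--         else:
--             if k - i < 0:
--                 continue
--             elif k - i == 0:
--                 k -= i
--                 answer += 1
--                 break
--             else:
--                 k -= i
--                 answer += 1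
--     '''
--     # 2차 풀이 - 성공
--     for i in count:
--         if k <= 0:
--             return answer
--         k -= i
--         answer += 1
--     return answer
-- ===== SOURCE B (Python) =====
-- def solution(k, tangerine):
--     counts = {}
--     for t in tangerine:
--         counts[t] = counts.get(t, 0) + 1
--     if k <= 0:
--         return 0
--     n = len(tangerine)
--     buckets = [0] * (n + 1)
--     for c in counts.values():
--         buckets[c] += 1
--     answer = 0
--     for c in range(n, 0, -1):
--         for _ in range(buckets[c]):
--             if k <= 0:
--                 return answer
--             k -= c
--             answer += 1
--     return answer
-- ===== Notes on version B (the rewrite author's own statement) =====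
-- stated objective: alternative
-- what changed: Replaces A's comparison sort of the tally values (sorted(..., reverse=True)) followed by a greedy scan with a counting-sort-style bucket array indexed by group size, traversed from the largest size downwards, with the k<=0 case handled up front.
import Mathlib
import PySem

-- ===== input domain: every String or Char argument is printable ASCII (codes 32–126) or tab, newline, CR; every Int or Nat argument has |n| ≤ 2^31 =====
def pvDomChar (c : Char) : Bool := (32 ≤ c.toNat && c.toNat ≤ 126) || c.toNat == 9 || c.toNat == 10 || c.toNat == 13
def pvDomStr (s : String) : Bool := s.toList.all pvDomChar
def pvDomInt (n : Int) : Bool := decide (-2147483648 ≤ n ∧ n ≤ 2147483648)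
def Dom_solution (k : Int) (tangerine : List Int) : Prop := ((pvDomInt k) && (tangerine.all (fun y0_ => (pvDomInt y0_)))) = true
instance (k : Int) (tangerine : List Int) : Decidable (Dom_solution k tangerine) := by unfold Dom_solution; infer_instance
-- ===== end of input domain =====

-- B replaces A's comparison sort of the tally values by a counting-sort-style bucket
-- array traversed from the largest group size downwards (objective: alternative algorithm).

-- ===== PORT A =====
-- second loop of A: 'for i in count: if k <= 0: return answer; k -= i; answer += 1' then 'return answer'
def greedyA (k answer : Int) : List Int → Int
  | [] => answer
  | i :: rest => if k ≤ 0 then answer else greedyA (k - i) (answer + 1) rest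

def solution (k : Int) (tangerine : List Int) : Int :=
  let count := tangerine.foldl
    (fun d i => if ¬ d.contains i then d.insert i 1 else d.insert i (d.getD i 0 + 1))
    PySem.Dict.empty
  let sortedCounts := PySem.List.sorted count.values (fun x => x) true
  greedyA k 0 sortedCounts

-- ===== PORT B =====
-- 'buckets[c] += 1'; c is always a count value with 1 ≤ c ≤ len(tangerine) < len(buckets),
-- so the in-range List.set is exact here
def bumpB (b : List Int) (c : Int) : List Int := b.set c.toNat (b.getD c.toNat 0 + 1)

-- 'for _ in range(buckets[c]): if k <= 0: return answer; k -= c; answer += 1'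
-- (.inl = early return from the function, .inr = state after this bucket)
def innerB (c : Int) : Nat → Int → Int → Sum Int (Int × Int)
  | 0, k, answer => .inr (k, answer)
  | m + 1, k, answer => if k ≤ 0 then .inl answer else innerB c m (k - c) (answer + 1)

-- 'for c in range(n, 0, -1): …' (bucket sizes are nonnegative, so .toNat is exact for range)
def outerB (buckets : List Int) : Nat → Int → Int → Int
  | 0, _, answer => answer
  | c + 1, k, answer =>
    match innerB ((c : Nat) + 1 : Nat) ((buckets.getD (c + 1) 0).toNat) k answer with
    | .inl a => a
    | .inr (k', a') => outerB buckets c k' a'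

def solution_alt (k : Int) (tangerine : List Int) : Int :=
  let counts := tangerine.foldl (fun d t => d.insert t (d.getD t 0 + 1)) PySem.Dict.empty
  if k ≤ 0 then 0
  else
    let n := tangerine.length
    let buckets := counts.values.foldl bumpB (List.replicate (n + 1) 0)
    outerB buckets n k 0

-- ===== PRECONDITION & SPEC =====
def Spec_solution (k : Int) (tangerine : List Int) (out : Int) : Prop := out = solution_alt k tangerine
instance (k : Int) (tangerine : List Int) (out : Int) : Decidable (Spec_solution k tangerine out) := by unfold Spec_solution; infer_instance

-- ===== CLAIM (what is proved, stated in full; the proofs are below) =====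
def Claim_equal_solution : Prop := ∀ (k : Int) (tangerine : List Int), Dom_solution k tangerine → Spec_solution k tangerine (solution k tangerine)

-- ===== LEMMAS AND PROOFS =====

theorem greedyA_nonpos (k a : Int) (h : k ≤ 0) (l : List Int) : greedyA k a l = a := by
  cases l <;> simp [greedyA, h]

-- the inner bucket loop is the greedy loop over 'm' copies of c
theorem innerB_spec (c : Int) : ∀ (m : Nat) (k a : Int) (rest : List Int),
    (match innerB c m k a with
     | .inl x => x
     | .inr (k', a') => greedyA k' a' rest) = greedyA k a (List.replicate m c ++ rest) := by
  intro m
  induction m with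
  | zero => intro k a rest; simp [innerB]
  | succ m ih =>
    intro k a rest
    by_cases h : k ≤ 0
    · simp [innerB, h, List.replicate_succ, greedyA]
    · simp only [innerB, h, List.replicate_succ, List.cons_append, greedyA, if_false]
      exact ih (k - c) (a + 1) rest

-- the descending sequence of group sizes the bucket traversal realises
def flatB (buckets : List Int) : Nat → List Int
  | 0 => []
  | c + 1 => List.replicate (buckets.getD (c + 1) 0).toNat ((c : Int) + 1) ++ flatB buckets c

theorem outerB_spec (buckets : List Int) : ∀ (c : Nat) (k a : Int),
    outerB buckets c k a = greedyA k a (flatB buckets c) := by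
  intro c
  induction c with
  | zero => intro k a; simp [outerB, flatB, greedyA]
  | succ c ih =>
    intro k a
    have h := innerB_spec ((c : Nat) + 1 : Nat) ((buckets.getD (c + 1) 0).toNat) k a (flatB buckets c)
    simp only [outerB, flatB]
    push_cast at h ⊢
    rw [← h]
    cases hi : innerB ((c : Int) + 1) ((buckets.getD (c + 1) 0).toNat) k a with
    | inl x => simp
    | inr p => simp [ih p.1 p.2]

theorem bucket_getD : ∀ (l : List Int) (b : List Int) (j : Nat),
    (∀ v ∈ l, 1 ≤ v ∧ v.toNat < b.length) → j < b.length →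
    (l.foldl bumpB b).getD j 0 = b.getD j 0 + (l.count (j : Int) : Int) := by
  intro l
  induction l with
  | nil => intro b j _ _; simp
  | cons v l ih =>
    intro b j hall hj
    have hv := hall v (by simp)
    have hall' : ∀ w ∈ l, 1 ≤ w ∧ w.toNat < (bumpB b v).length := by
      intro w hw
      have := hall w (by simp [hw])
      simpa [bumpB] using this
    have hj' : j < (bumpB b v).length := by simpa [bumpB] using hj
    rw [List.foldl_cons, ih (bumpB b v) j hall' hj']
    by_cases hvj : v = (j : Int)
    · have hvn : v.toNat = j := by omega
      subst hvj
      simp [bumpB, List.getD, hvn, hj]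
      omega
    · have hvn : v.toNat ≠ j := by omega
      simp [bumpB, List.getD, hvn, hvj]

theorem count_flatB (buckets : List Int) : ∀ (c : Nat) (a : Int),
    (flatB buckets c).count a =
      if 1 ≤ a ∧ a ≤ (c : Int) then (buckets.getD a.toNat 0).toNat else 0 := by
  intro c
  induction c with
  | zero => intro a; simp [flatB]; omega
  | succ c ih =>
    intro a
    simp only [flatB, List.count_append, List.count_replicate, ih]
    by_cases h1 : a = (c : Int) + 1
    · have h2 : ¬ (1 ≤ a ∧ a ≤ (c : Int)) := by omega
      have h3 : (1 ≤ a ∧ a ≤ (c : Int) + 1) := by omega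
      have hn : a.toNat = c + 1 := by omega
      simp [h1]
    · have h4 : ((c : Int) + 1 = a) = False := by simp; omega
      by_cases h5 : 1 ≤ a ∧ a ≤ (c : Int)
      · have h6 : (1 ≤ a ∧ a ≤ (c : Int) + 1) := by omega
        simp [h4, h5, h6]
      · have h6 : ¬ (1 ≤ a ∧ a ≤ (c : Int) + 1) := by omega
        simp [h4, h5, h6]

theorem mem_flatB_le (buckets : List Int) : ∀ (c : Nat) (x : Int),
    x ∈ flatB buckets c → 1 ≤ x ∧ x ≤ (c : Int) := by
  intro c
  induction c with
  | zero => intro x hx; simp [flatB] at hx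
  | succ c ih =>
    intro x hx
    simp only [flatB, List.mem_append, List.mem_replicate] at hx
    rcases hx with ⟨_, rfl⟩ | hx
    · constructor <;> omega
    · have := ih x hx; omega

theorem pairwise_flatB (buckets : List Int) : ∀ (c : Nat),
    (flatB buckets c).Pairwise (fun a b => b ≤ a) := by
  intro c
  induction c with
  | zero => simp [flatB]
  | succ c ih =>
    simp only [flatB]
    rw [List.pairwise_append]
    refine ⟨List.pairwise_replicate.mpr (Or.inr le_rfl), ih, ?_⟩
    intro a ha b hb
    rw [List.mem_replicate] at ha
    have hb' := mem_flatB_le buckets c b hb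
    omega

-- A's tally loop builds Counter(tangerine)
theorem dictA_eq_counter (xs : List Int) :
    xs.foldl
      (fun d i => if ¬ d.contains i then d.insert i 1 else d.insert i (d.getD i 0 + 1))
      PySem.Dict.empty = PySem.Dict.counter xs := by
  have hf : (fun (d : PySem.Dict Int Int) i =>
      if ¬ d.contains i then d.insert i 1 else d.insert i (d.getD i 0 + 1)) =
      (fun d i => d.insert i (d.getD i 0 + 1)) := by
    funext d i
    by_cases h : d.contains i
    · simp [h]
    · simp [h, PySem.Dict.getD_of_not_contains _ _ (by simpa using h)]
  rw [hf, PySem.Dict.foldl_insert_getD_add_one_eq_counter]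

theorem vals_bounds (xs : List Int) :
    ∀ v ∈ (PySem.Dict.counter xs).values, 1 ≤ v ∧ v ≤ (xs.length : Int) := by
  intro v hv
  simp only [PySem.Dict.values, PySem.Dict.items_counter, List.map_map, List.mem_map] at hv
  obtain ⟨a, ha, rfl⟩ := hv
  have hmem : a ∈ xs := (PySem.Set.mem_ofList _ _).mp ha
  have h1 : 1 ≤ xs.count a := List.one_le_count_iff.mpr hmem
  have h2 : xs.count a ≤ xs.length := List.count_le_length
  constructor <;> simp <;> omega

-- the bucket traversal enumerates exactly sorted(values, reverse=True)
theorem flatB_eq_sorted (xs : List Int) :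
    flatB ((PySem.Dict.counter xs).values.foldl bumpB (List.replicate (xs.length + 1) 0))
        xs.length =
      PySem.List.sorted (PySem.Dict.counter xs).values (fun x => x) true := by
  set vals := (PySem.Dict.counter xs).values with hvals
  set n := xs.length with hn
  set buckets := vals.foldl bumpB (List.replicate (n + 1) 0) with hbuckets
  have hbnd : ∀ v ∈ vals, 1 ≤ v ∧ v.toNat < (List.replicate (n + 1) (0 : Int)).length := by
    intro v hv
    have := vals_bounds xs v hv
    simp only [List.length_replicate]
    omega
  have hget : ∀ j : Nat, j < n + 1 → buckets.getD j 0 = (vals.count (j : Int) : Int) := by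
    intro j hj
    rw [hbuckets, bucket_getD vals _ j hbnd (by simpa using hj)]
    simp [List.getD, hj]
  have hperm : (flatB buckets n).Perm vals := by
    rw [List.perm_iff_count]
    intro a
    rw [count_flatB]
    by_cases h : 1 ≤ a ∧ a ≤ (n : Int)
    · have hj : a.toNat < n + 1 := by omega
      rw [if_pos h, hget a.toNat hj]
      have : ((a.toNat : Nat) : Int) = a := by omega
      rw [this]
      omega
    · rw [if_neg h]
      symm
      rw [List.count_eq_zero]
      intro hmem
      exact h (vals_bounds xs a hmem)
  have hsp : (PySem.List.sorted vals (fun x => x) true).Perm vals := PySem.List.sorted_perm _ _ _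
  have hperm2 : (flatB buckets n).reverse.Perm (PySem.List.sorted vals (fun x => x) true).reverse :=
    ((flatB buckets n).reverse_perm.trans (hperm.trans hsp.symm)).trans
      (PySem.List.sorted vals (fun x => x) true).reverse_perm.symm
  have hp1 : ((flatB buckets n).reverse).Pairwise (fun a b : Int => a ≤ b) := by
    rw [List.pairwise_reverse]
    exact pairwise_flatB buckets n
  have hp2 : ((PySem.List.sorted vals (fun x => x) true).reverse).Pairwise (fun a b : Int => a ≤ b) := by
    rw [List.pairwise_reverse]
    exact PySem.List.sorted_pairwise_rev _ _
  have := PySem.List.eq_of_perm_of_pairwise_le_of_injective (fun x : Int => x)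
    (fun a b h => h) hperm2 hp1 hp2
  have hrev : (flatB buckets n).reverse = (PySem.List.sorted vals (fun x => x) true).reverse := this
  have := congrArg List.reverse hrev
  simpa using this

-- ===== VERDICT (by name: the statement is the Claim_ definition above) =====
theorem solution_spec : Claim_equal_solution := by
  intro k tangerine _
  unfold Spec_solution solution solution_alt
  simp only [dictA_eq_counter, PySem.Dict.foldl_insert_getD_add_one_eq_counter]
  by_cases hk : k ≤ 0
  · simp [hk, greedyA_nonpos]
  · rw [if_neg hk, outerB_spec, flatB_eq_sorted]
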